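-- pv_equiv track=rewrite | github.com/yutaoshao/openbot | src/memory/procedural/helpers.py | dedupe_preferences
-- ===== SOURCE A (Python) =====
-- from typing import Any
--
-- def dedupe_preferences(prefs: list[dict[str, Any]]) -> list[dict[str, Any]]:
--     deduped: dict[tuple[str, str], dict[str, Any]] = {}
--     for pref in prefs:
--         token = (pref["category"], pref["key"])
--         current = deduped.get(token)
--         if current is None or not current.get("user_id"):
--             deduped[token] = pref
--     return list(deduped.values())
-- ===== SOURCE B (Python) =====
-- from typing import Any
--
-- def dedupe_preferences(prefs: list[dict[str, Any]]) -> list[dict[str, Any]]: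
--     groups: dict[tuple[str, str], list[dict[str, Any]]] = {}
--     for pref in prefs:
--         groups.setdefault((pref["category"], pref["key"]), []).append(pref)
--     return [next((p for p in group if p.get("user_id")), group[-1])
--             for group in groups.values()]
-- ===== Notes on version B (the rewrite author's own statement) =====
-- stated objective: alternative
-- what changed: Replaces the online replace-if-current-has-no-user_id dict update with a group-then-select shape: one pass groups prefs by (category,key), then each group yields its first truthy-user_id entry or its last member.
import Mathlib
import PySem

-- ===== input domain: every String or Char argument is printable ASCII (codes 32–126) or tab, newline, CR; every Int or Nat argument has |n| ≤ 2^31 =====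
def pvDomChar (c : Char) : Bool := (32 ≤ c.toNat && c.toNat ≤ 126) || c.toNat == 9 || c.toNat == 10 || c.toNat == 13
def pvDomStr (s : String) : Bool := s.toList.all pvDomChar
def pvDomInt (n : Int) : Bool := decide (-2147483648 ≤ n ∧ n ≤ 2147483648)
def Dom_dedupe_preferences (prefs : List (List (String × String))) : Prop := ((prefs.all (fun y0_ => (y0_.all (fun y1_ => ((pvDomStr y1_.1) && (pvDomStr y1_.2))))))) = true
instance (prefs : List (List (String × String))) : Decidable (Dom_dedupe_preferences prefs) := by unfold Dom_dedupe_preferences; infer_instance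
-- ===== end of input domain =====

-- B replaces A's online replace-unless-current-has-user_id dict update by a group-by-token
-- pass followed by a per-group selection (first truthy user_id, else last); same cost.

-- shared dict primitives (both Pythons read prefs through Python-dict lookups)
def pvGetS? (pref : List (String × String)) (k : String) : Option String :=
  (PySem.Dict.ofList pref).get? k

-- token = (pref["category"], pref["key"]); Pre_ guarantees the keys exist, the getD "" is never taken there
def pvToken (pref : List (String × String)) : String × String :=
  ((pvGetS? pref "category").getD "", (pvGetS? pref "key").getD "")

-- truthiness of pref.get("user_id") (a string: truthy iff present and nonempty)
def pvTruthy (pref : List (String × String)) : Bool :=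
  match pvGetS? pref "user_id" with
  | some s => !(s == "")
  | none => false

-- ===== PORT A =====
def dedupe_preferences (prefs : List (List (String × String))) : List (List (String × String)) :=
  (prefs.foldl (fun d pref =>
      match d.get? (pvToken pref) with
      | none => d.insert (pvToken pref) pref
      | some current => if pvTruthy current then d else d.insert (pvToken pref) pref)
    PySem.Dict.empty).values

-- ===== PORT B =====
-- next((p for p in group if p.get("user_id")), group[-1])
def pvSelect (group : List (List (String × String))) : List (String × String) :=
  (group.find? pvTruthy).getD (PySem.List.pyGetD group (-1) [])

def dedupe_preferences_alt (prefs : List (List (String × String))) : List (List (String × String)) :=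
  ((prefs.foldl (fun d pref => d.modify (pvToken pref) [] (· ++ [pref]))
      PySem.Dict.empty).values).map pvSelect

-- ===== PRECONDITION & SPEC =====
-- Pre_ excludes exactly the prefs on which Python A raises KeyError (a pref missing
-- the "category" or "key" key); B raises there too.
def Pre_dedupe_preferences (prefs : List (List (String × String))) : Prop :=
  ∀ pref ∈ prefs, (PySem.Dict.ofList pref).contains "category" = true ∧
                  (PySem.Dict.ofList pref).contains "key" = true
instance (prefs : List (List (String × String))) : Decidable (Pre_dedupe_preferences prefs) := by unfold Pre_dedupe_preferences; infer_instance

def pvWitness_dedupe_preferences : (List (List (String × String))) :=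
  ([[("category", "food"), ("key", "diet"), ("user_id", "u1")],
    [("category", "food"), ("key", "diet")]])

def Spec_dedupe_preferences (prefs : List (List (String × String))) (out : List (List (String × String))) : Prop := out = dedupe_preferences_alt prefs
instance (prefs : List (List (String × String))) (out : List (List (String × String))) : Decidable (Spec_dedupe_preferences prefs out) := by unfold Spec_dedupe_preferences; infer_instance

-- ===== CLAIM (what is proved, stated in full; the proofs are below) =====
def Claim_equal_dedupe_preferences : Prop := ∀ (prefs : List (List (String × String))), Dom_dedupe_preferences prefs → Pre_dedupe_preferences prefs → Spec_dedupe_preferences prefs (dedupe_preferences prefs)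

-- ===== LEMMAS AND PROOFS =====

-- A's loop body / loop, named for the proofs
def stepA (d : PySem.Dict (String × String) (List (String × String)))
    (pref : List (String × String)) : PySem.Dict (String × String) (List (String × String)) :=
  match d.get? (pvToken pref) with
  | none => d.insert (pvToken pref) pref
  | some current => if pvTruthy current then d else d.insert (pvToken pref) pref

def foldA (l : List (List (String × String))) : PySem.Dict (String × String) (List (String × String)) :=
  l.foldl stepA PySem.Dict.empty

def foldB (l : List (List (String × String))) : PySem.Dict (String × String) (List (List (String × String))) :=
  l.foldl (fun d pref => d.modify (pvToken pref) [] (· ++ [pref])) PySem.Dict.empty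

theorem dedupe_eq_foldA (prefs : List (List (String × String))) :
    dedupe_preferences prefs = (foldA prefs).values := rfl

theorem alt_eq_foldB (prefs : List (List (String × String))) :
    dedupe_preferences_alt prefs = (foldB prefs).values.map pvSelect := rfl

theorem keys_foldB (l : List (List (String × String))) :
    (foldB l).keys = PySem.Set.ofList (l.map pvToken) := by
  unfold foldB
  rw [PySem.Dict.keys_foldl_modify_key]
  simp [PySem.Dict.keys_empty, PySem.Set.update_nil_left]

theorem nodup_keys_foldB (l : List (List (String × String))) : (foldB l).keys.Nodup := by
  rw [keys_foldB]; exact PySem.Set.nodup_ofList _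

theorem getD_foldB (l : List (List (String × String))) (c : String × String) :
    (foldB l).getD c [] = l.filter (fun p => pvToken p == c) := by
  unfold foldB
  have hmap : l.foldl (fun d pref => d.modify (pvToken pref) [] (· ++ [pref])) PySem.Dict.empty
      = (l.map (fun pref => (pvToken pref, pref))).foldl
          (fun d p => d.modify p.1 [] (· ++ [p.2])) PySem.Dict.empty := by
    rw [List.foldl_map]
  rw [hmap, PySem.Dict.getD_foldl_modify_append]
  simp [PySem.Dict.getD_empty, List.filter_map, List.map_map, Function.comp_def]

theorem stepA_of_none (d : PySem.Dict (String × String) (List (String × String)))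
    (p : List (String × String)) (h : d.get? (pvToken p) = none) :
    stepA d p = d.insert (pvToken p) p := by
  unfold stepA; rw [h]

theorem stepA_of_truthy (d : PySem.Dict (String × String) (List (String × String)))
    (p cur : List (String × String)) (h : d.get? (pvToken p) = some cur)
    (ht : pvTruthy cur = true) : stepA d p = d := by
  unfold stepA; rw [h]; simp [ht]

theorem stepA_of_not_truthy (d : PySem.Dict (String × String) (List (String × String)))
    (p cur : List (String × String)) (h : d.get? (pvToken p) = some cur)
    (ht : pvTruthy cur = false) : stepA d p = d.insert (pvToken p) p := by
  unfold stepA; rw [h]; simp [ht]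

theorem keys_stepA (d : PySem.Dict (String × String) (List (String × String)))
    (p : List (String × String)) :
    (stepA d p).keys = PySem.Set.add d.keys (pvToken p) := by
  rcases h : d.get? (pvToken p) with _ | cur
  · have hc : d.contains (pvToken p) = false := by
      rw [PySem.Dict.contains_eq_isSome_get?, h]; rfl
    rw [stepA_of_none d p h, PySem.Dict.keys_insert_of_not_contains _ _ hc,
        PySem.Set.add_of_not_mem]
    intro hm
    exact absurd ((PySem.Dict.contains_iff_mem_keys _ _).mpr hm) (by simp [hc])
  · have hc : d.contains (pvToken p) = true := by
      rw [PySem.Dict.contains_eq_isSome_get?, h]; rfl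
    have hmem : pvToken p ∈ d.keys := (PySem.Dict.contains_iff_mem_keys _ _).mp hc
    rcases ht : pvTruthy cur with _ | _
    · rw [stepA_of_not_truthy d p cur h ht, PySem.Dict.keys_insert_of_contains _ _ hc,
          PySem.Set.add_of_mem hmem]
    · rw [stepA_of_truthy d p cur h ht, PySem.Set.add_of_mem hmem]

theorem keys_foldA (l : List (List (String × String))) :
    (foldA l).keys = PySem.Set.ofList (l.map pvToken) := by
  induction l using List.reverseRecOn with
  | nil => rfl
  | append_singleton l p ih =>
    unfold foldA at *
    rw [List.foldl_append, List.map_append, PySem.Set.ofList_append]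
    simp only [List.map_cons, List.map_nil]
    rw [PySem.Set.update_cons, PySem.Set.update_nil, List.foldl_cons, List.foldl_nil]
    rw [keys_stepA, ih]

theorem nodup_keys_foldA (l : List (List (String × String))) : (foldA l).keys.Nodup := by
  rw [keys_foldA]; exact PySem.Set.nodup_ofList _

-- selection over a group extended on the right, when the existing selection is not truthy
theorem pvSelect_append_of_not_truthy (g : List (List (String × String)))
    (p : List (String × String)) (h : g.find? pvTruthy = none) :
    pvSelect (g ++ [p]) = p := by
  unfold pvSelect
  rw [List.find?_append, h]
  rcases hp : pvTruthy p with _ | _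
  · simp [hp, PySem.List.pyGetD_neg_one_append_singleton]
  · simp [hp]

theorem pvSelect_append_of_truthy (g : List (List (String × String)))
    (p : List (String × String)) (q : List (String × String)) (h : g.find? pvTruthy = some q) :
    pvSelect (g ++ [p]) = pvSelect g := by
  unfold pvSelect
  rw [List.find?_append, h]; simp

theorem truthy_pvSelect_iff (g : List (List (String × String))) :
    pvTruthy (pvSelect g) = true ↔ ∃ q, g.find? pvTruthy = some q := by
  unfold pvSelect
  rcases h : g.find? pvTruthy with _ | q
  · simp only [Option.getD_none]
    constructor
    · intro ht
      exfalso
      -- pvSelect fell back to the last element / default; show default not truthy or last not truthy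
      rcases g.eq_nil_or_concat with rfl | ⟨g', p, rfl⟩
      · exact absurd ht (by decide)
      · simp only [List.concat_eq_append] at h ht
        rw [PySem.List.pyGetD_neg_one_append_singleton] at ht
        rw [List.find?_append] at h
        rcases hf : g'.find? pvTruthy with _ | _ <;> simp [hf] at h
        simp [ht] at h
    · rintro ⟨q, hq⟩; simp at hq
  · simp only [Option.getD_some]
    exact ⟨fun _ => ⟨q, rfl⟩, fun _ => List.find?_some h⟩

-- the core invariant: A's stored value at each key is B's selection of that key's group
theorem getD_foldA (l : List (List (String × String))) (c : String × String)
    (hne : l.filter (fun p => pvToken p == c) ≠ []) :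
    (foldA l).getD c [] = pvSelect (l.filter (fun p => pvToken p == c)) := by
  induction l using List.reverseRecOn with
  | nil => simp at hne
  | append_singleton l p ih =>
    unfold foldA at *
    rw [List.foldl_append, List.foldl_cons, List.foldl_nil] at *
    rw [List.filter_append] at *
    set d := l.foldl stepA PySem.Dict.empty with hd
    by_cases ht : pvToken p = c
    · subst ht
      simp only [List.filter_cons, List.filter_nil, beq_self_eq_true, if_true] at hne ⊢
      by_cases hf : l.filter (fun q => pvToken q == pvToken p) = []
      · have hget : d.get? (pvToken p) = none := by
          rw [PySem.Dict.get?_eq_none_iff_contains, PySem.Dict.contains_eq_decide_mem_keys]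
          have hk := keys_foldA l
          unfold foldA at hk
          rw [← hd] at hk
          rw [hk]
          simp only [decide_eq_false_iff_not, PySem.Set.mem_ofList, List.mem_map]
          rintro ⟨q, hq, hqc⟩
          have : q ∈ l.filter (fun q => pvToken q == pvToken p) := by
            simp [List.mem_filter, hq, hqc]
          simp [hf] at this
        rw [stepA_of_none d p hget, PySem.Dict.getD_insert_self, hf]
        simp only [List.nil_append]
        unfold pvSelect
        rcases hp : pvTruthy p <;>
          simp [List.find?, hp, PySem.List.pyGetD, PySem.List.pyGet?, PySem.List.pyIdx?]
      · have hA := ih hf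
        rcases hgf : d.get? (pvToken p) with _ | cur
        · exfalso
          rw [PySem.Dict.get?_eq_none_iff_contains, PySem.Dict.contains_eq_decide_mem_keys] at hgf
          have hk := keys_foldA l
          unfold foldA at hk
          rw [← hd] at hk
          rw [hk] at hgf
          rcases List.exists_mem_of_ne_nil _ hf with ⟨q, hq⟩
          rw [List.mem_filter] at hq
          simp only [decide_eq_false_iff_not, PySem.Set.mem_ofList, List.mem_map] at hgf
          exact hgf ⟨q, hq.1, by simpa using hq.2⟩
        · have hgD : d.getD (pvToken p) [] = cur := PySem.Dict.getD_of_get?_eq_some _ _ hgf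
          rcases htr : pvTruthy cur with _ | _
          · rw [stepA_of_not_truthy d p cur hgf htr, PySem.Dict.getD_insert_self]
            have hnone : (l.filter (fun q => pvToken q == pvToken p)).find? pvTruthy = none := by
              rcases hfind : (l.filter (fun q => pvToken q == pvToken p)).find? pvTruthy with _ | q
              · rfl
              · exfalso
                have := (truthy_pvSelect_iff _).mpr ⟨q, hfind⟩
                rw [← hA, hgD, htr] at this
                simp at this
            rw [pvSelect_append_of_not_truthy _ _ hnone]
          · rw [stepA_of_truthy d p cur hgf htr]
            have hex := (truthy_pvSelect_iff (l.filter (fun q => pvToken q == pvToken p))).mp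
              (by rw [← hA, hgD]; exact htr)
            rcases hex with ⟨q, hq⟩
            rw [pvSelect_append_of_truthy _ _ _ hq, hgD, ← hgD, hA]
    · have hb : (pvToken p == c) = false := by simpa using ht
      simp only [List.filter_cons, List.filter_nil, hb, Bool.false_eq_true, if_false,
        List.append_nil] at hne ⊢
      have key_ne : c ≠ pvToken p := fun h => ht h.symm
      rcases hg : d.get? (pvToken p) with _ | cur
      · rw [stepA_of_none d p hg, PySem.Dict.getD_insert_of_ne _ _ _ key_ne]; exact ih hne
      · rcases htr : pvTruthy cur with _ | _
        · rw [stepA_of_not_truthy d p cur hg htr, PySem.Dict.getD_insert_of_ne _ _ _ key_ne]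
          exact ih hne
        · rw [stepA_of_truthy d p cur hg htr]; exact ih hne

-- ===== VERDICT (by name: the statement is the Claim_ definition above) =====
theorem dedupe_preferences_spec : Claim_equal_dedupe_preferences := by
  intro prefs _ _
  show dedupe_preferences prefs = dedupe_preferences_alt prefs
  rw [dedupe_eq_foldA, alt_eq_foldB]
  rw [PySem.Dict.values_eq_map_keys _ (nodup_keys_foldA prefs) [],
      PySem.Dict.values_eq_map_keys _ (nodup_keys_foldB prefs) []]
  rw [keys_foldA, keys_foldB, List.map_map]
  apply List.map_congr_left
  intro c hc
  rw [PySem.Set.mem_ofList, List.mem_map] at hc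
  rcases hc with ⟨p, hp, hpc⟩
  have hne : prefs.filter (fun q => pvToken q == c) ≠ [] := by
    intro h
    have : p ∈ prefs.filter (fun q => pvToken q == c) := by simp [List.mem_filter, hp, hpc]
    simp [h] at this
  rw [getD_foldA prefs c hne, Function.comp_apply, getD_foldB]
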